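-- pv_equiv track=rewrite | github.com/berNy92k/algorithmic-challenges_java_python | python/src/euler/problem005.py | smallest_value_without_reminder
-- ===== SOURCE A (Python) =====
-- def smallest_value_without_reminder(min, max):
--     smallest_number = None
--
--     counter = max
--     while smallest_number is None:
--         with_reminders = False
--         for i in range(min, max):
--             if counter % i != 0:
--                 with_reminders = True
--                 break
--
--         if with_reminders:
--             counter += 1
--             continue
--
--         smallest_number = counter
--
--     return smallest_number
-- ===== SOURCE B (Python) =====
-- def _gcd(a, b):
--     a = abs(a)
--     b = abs(b)
--     while b:
--         a, b = b, a % b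
--     return a
--
--
-- def smallest_value_without_reminder(min, max):
--     # LCM of all integers in [min, max), then smallest multiple of it >= max.
--     if min < max and max <= 0:
--         # every i in the non-empty range has |i| > -max, so 0 is the
--         # smallest (indeed only) multiple of their lcm that is >= max
--         return 0
--     l = 1
--     for i in range(min, max):
--         l = abs(l * i) // _gcd(l, i)
--     return -(-max // l) * l
-- ===== Notes on version B (the rewrite author's own statement) =====
-- stated objective: alternative
-- what changed: Instead of testing every candidate counter = max, max+1, ... against every divisor in [min,max), B computes the LCM of the range once via Euclid's gcd and returns the smallest multiple of it that is >= max by one ceiling division (plus a trivial 0 answer for non-empty all-negative ranges).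
import Mathlib
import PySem

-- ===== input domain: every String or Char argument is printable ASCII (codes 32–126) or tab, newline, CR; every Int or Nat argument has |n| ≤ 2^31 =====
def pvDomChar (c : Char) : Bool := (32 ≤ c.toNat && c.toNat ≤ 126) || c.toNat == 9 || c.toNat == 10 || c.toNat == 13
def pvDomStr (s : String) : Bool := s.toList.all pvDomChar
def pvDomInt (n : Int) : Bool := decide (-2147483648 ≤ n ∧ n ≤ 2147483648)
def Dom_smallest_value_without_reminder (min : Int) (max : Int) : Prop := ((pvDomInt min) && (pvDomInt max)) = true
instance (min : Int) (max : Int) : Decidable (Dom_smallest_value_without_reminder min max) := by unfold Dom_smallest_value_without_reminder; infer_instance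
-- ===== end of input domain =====

-- B replaces A's candidate-by-candidate trial division (counter = max, max+1, ...) by one LCM
-- of the range computed with Euclid's gcd, followed by a single ceiling division.

-- ===== PORT A =====
-- the 'for i in range(min, max): if counter % i != 0: with_reminders = True; break' flag is List.any
def svwrCheck (min max counter : Int) : Bool :=
  (PySem.List.pyRange min max 1).any (fun i => PySem.Int.mod counter i != 0)

-- the 'while smallest_number is None' loop; the fuel parameter only makes the recursion total
-- (it is proven sufficient on every Pre_ input below and plays no role in the computed value)
def svwrLoop (min max : Int) : Nat → Int → Int
  | 0, counter => counter
  | fuel+1, counter =>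
    if svwrCheck min max counter then svwrLoop min max fuel (counter + 1) else counter

-- fuel: (a positive bound on the number of iterations) = lcm of the range, plus one
def svwrFuel (min max : Int) : Nat :=
  ((PySem.List.pyRange min max 1).foldl (fun a i => Nat.lcm a i.natAbs) 1) + 1

def smallest_value_without_reminder (min : Int) (max : Int) : Int :=
  svwrLoop min max (svwrFuel min max) max

-- ===== PORT B =====
-- Source B's _gcd: both arguments are taken through abs first, so it is a recursion on Nat
def pvGcd (a b : Nat) : Nat :=
  if h : b = 0 then a else pvGcd b (a % b)
termination_by b
decreasing_by exact Nat.mod_lt _ (Nat.pos_of_ne_zero h)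

def smallest_value_without_reminder_alt (min : Int) (max : Int) : Int :=
  -- shortcut: every i in the non-empty range has |i| > -max, so 0 is the only multiple >= max
  if min < max ∧ max ≤ 0 then 0
  else
  let l := (PySem.List.pyRange min max 1).foldl
    (fun l i => PySem.Int.floordiv ((l * i).natAbs : Int) ((pvGcd l.natAbs i.natAbs : Nat) : Int)) 1;
  -(PySem.Int.floordiv (-max) l) * l

-- ===== PRECONDITION & SPEC =====
-- Pre_ excludes exactly the inputs with min ≤ 0 < max, i.e. 0 ∈ range(min, max):
-- there A's 'counter % i' raises ZeroDivisionError (as does B's division by the zero lcm).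
def Pre_smallest_value_without_reminder (min : Int) (max : Int) : Prop :=
  ¬ (min ≤ 0 ∧ 0 < max)
instance (min : Int) (max : Int) : Decidable (Pre_smallest_value_without_reminder min max) := by
  unfold Pre_smallest_value_without_reminder; infer_instance

def pvWitness_smallest_value_without_reminder : Int × Int := (1, 11)

def Spec_smallest_value_without_reminder (min : Int) (max : Int) (out : Int) : Prop := out = smallest_value_without_reminder_alt min max
instance (min : Int) (max : Int) (out : Int) : Decidable (Spec_smallest_value_without_reminder min max out) := by unfold Spec_smallest_value_without_reminder; infer_instance

-- ===== CLAIM (what is proved, stated in full; the proofs are below) =====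
def Claim_equal_smallest_value_without_reminder : Prop := ∀ (min : Int) (max : Int), Dom_smallest_value_without_reminder min max → Pre_smallest_value_without_reminder min max → Spec_smallest_value_without_reminder min max (smallest_value_without_reminder min max)

-- ===== LEMMAS AND PROOFS =====

theorem pvGcd_eq_gcd (a b : Nat) : pvGcd a b = Nat.gcd a b := by
  induction b using Nat.strong_induction_on generalizing a with
  | _ b ih =>
    rw [pvGcd]
    by_cases h : b = 0
    · simp [h]
    · rw [dif_neg h, ih (a % b) (Nat.mod_lt _ (Nat.pos_of_ne_zero h)) b]
      exact ((Nat.gcd_comm b (a % b)).trans (Nat.gcd_rec b a).symm).trans (Nat.gcd_comm b a)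

-- B's Int-valued fold is the Nat lcm-fold, cast
theorem foldB_eq (xs : List Int) (n : Nat) :
    xs.foldl (fun l i => PySem.Int.floordiv ((l * i).natAbs : Int)
      ((pvGcd l.natAbs i.natAbs : Nat) : Int)) (n : Int)
    = ((xs.foldl (fun a i => Nat.lcm a i.natAbs) n : Nat) : Int) := by
  induction xs generalizing n with
  | nil => rfl
  | cons i xs ih =>
    simp only [List.foldl_cons]
    have : PySem.Int.floordiv (((n : Int) * i).natAbs : Int)
        ((pvGcd (n : Int).natAbs i.natAbs : Nat) : Int)
        = ((Nat.lcm n i.natAbs : Nat) : Int) := by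
      rw [Int.natAbs_mul, Int.natAbs_natCast, pvGcd_eq_gcd]
      rw [show ((n * i.natAbs : Nat) : Int) = ((n * i.natAbs : Nat) : Int) from rfl]
      rw [PySem.Int.floordiv_natCast]
      rfl
    rw [this, ih]

-- divisibility characterisation of the lcm-fold
theorem foldN_dvd (xs : List Int) (n : Nat) (c : Int) :
    ((xs.foldl (fun a i => Nat.lcm a i.natAbs) n : Nat) : Int) ∣ c
    ↔ ((n : Int) ∣ c ∧ ∀ i ∈ xs, i ∣ c) := by
  induction xs generalizing n with
  | nil => simp
  | cons i xs ih =>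
    simp only [List.foldl_cons, ih, List.mem_cons]
    constructor
    · rintro ⟨h1, h2⟩
      have hn : (n : Int) ∣ c := by
        exact dvd_trans (Int.natCast_dvd_natCast.mpr (Nat.dvd_lcm_left _ _)) h1
      have hi : i ∣ c := by
        rw [← Int.natAbs_dvd]
        exact dvd_trans (Int.natCast_dvd_natCast.mpr (Nat.dvd_lcm_right _ _)) h1
      exact ⟨hn, fun j hj => hj.elim (fun e => e ▸ hi) (h2 j)⟩
    · rintro ⟨hn, hall⟩
      refine ⟨?_, fun j hj => hall j (Or.inr hj)⟩
      rw [Int.natCast_dvd]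
      refine Nat.lcm_dvd ?_ ?_
      · exact Int.natCast_dvd.mp hn
      · exact Int.natCast_dvd.mp (Int.natAbs_dvd.mpr (hall i (Or.inl rfl)))

theorem foldN_pos (xs : List Int) (n : Nat) (hn : 0 < n) (h0 : ∀ i ∈ xs, i ≠ 0) :
    0 < xs.foldl (fun a i => Nat.lcm a i.natAbs) n := by
  induction xs generalizing n with
  | nil => exact hn
  | cons i xs ih =>
    refine ih _ (Nat.lcm_pos hn ?_) (fun j hj => h0 j (List.mem_cons_of_mem _ hj))
    have := h0 i (List.mem_cons_self ..)
    omega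

theorem check_false_iff (min max c : Int) :
    svwrCheck min max c = false ↔ ∀ i ∈ PySem.List.pyRange min max 1, i ∣ c := by
  simp [svwrCheck, PySem.Int.mod_eq_zero_iff_dvd]

theorem loop_reaches (min max L T : Int) (hL : 0 < L)
    (hiff : ∀ c, svwrCheck min max c = false ↔ L ∣ c) (hT : L ∣ T) :
    ∀ (fuel : Nat) (c : Int), c ≤ T → (∀ d, c ≤ d → d < T → ¬ L ∣ d) →
      (T - c).toNat < fuel → svwrLoop min max fuel c = T := by
  intro fuel
  induction fuel with
  | zero => intro c _ _ h; omega
  | succ f ih =>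
    intro c hcT hmin hfuel
    rw [svwrLoop]
    by_cases h : svwrCheck min max c = false
    · rw [h, if_neg (by simp)]
      have hdvd : L ∣ c := (hiff c).mp h
      by_contra hne
      exact hmin c le_rfl (lt_of_le_of_ne hcT (fun e => hne (e ▸ rfl))) hdvd
    · have h' : svwrCheck min max c = true := by
        cases hc : svwrCheck min max c
        · exact absurd hc h
        · rfl
      rw [h', if_pos rfl]
      have hndvd : ¬ L ∣ c := fun hd => h ((hiff c).mpr hd)
      have hlt : c < T := lt_of_le_of_ne hcT (fun e => hndvd (e ▸ hT))
      exact ih (c + 1) hlt (fun d hd1 hd2 => hmin d (by omega) hd2) (by omega)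

-- ===== VERDICT (by name: the statement is the Claim_ definition above) =====
theorem smallest_value_without_reminder_spec : Claim_equal_smallest_value_without_reminder := by
  intro min max _ hpre
  unfold Spec_smallest_value_without_reminder
  unfold Pre_smallest_value_without_reminder at hpre
  set xs := PySem.List.pyRange min max 1 with hxs
  have h0 : ∀ i ∈ xs, i ≠ 0 := by
    intro i hi
    rw [hxs, PySem.List.mem_pyRange_one] at hi
    intro e
    exact hpre ⟨by omega, by omega⟩
  set N : Nat := xs.foldl (fun a i => Nat.lcm a i.natAbs) 1 with hN
  have hNpos : 0 < N := foldN_pos xs 1 Nat.one_pos h0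
  set L : Int := (N : Int) with hLdef
  have hLpos : 0 < L := by rw [hLdef]; exact_mod_cast hNpos
  have hiff : ∀ c, svwrCheck min max c = false ↔ L ∣ c := by
    intro c
    rw [check_false_iff, hLdef, hN, foldN_dvd, ← hxs]
    exact (and_iff_right (one_dvd c)).symm
  by_cases hbr : min < max ∧ max ≤ 0
  · -- B's shortcut branch returns 0; A's loop also reaches 0
    have hB : smallest_value_without_reminder_alt min max = 0 := by
      simp only [smallest_value_without_reminder_alt, if_pos hbr]
    have hmem : (max - 1) ∈ xs := by
      rw [hxs, PySem.List.mem_pyRange_one]; omega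
    have hdL : (max - 1) ∣ L := by
      have : ((xs.foldl (fun a i => Nat.lcm a i.natAbs) 1 : Nat) : Int) ∣ L := by
        rw [hLdef, hN]
      exact ((foldN_dvd xs 1 L).mp this).2 _ hmem
    have h1 : 1 - max ≤ L := by
      have : (1 - max) ∣ L := by
        have := (Int.neg_dvd (a := max - 1) (b := L)).mpr hdL
        simpa [neg_sub] using this
      exact Int.le_of_dvd hLpos this
    have hmin : ∀ d, max ≤ d → d < 0 → ¬ L ∣ d := by
      intro d hd1 hd2 hdvd
      have : L ∣ -d := (dvd_neg).mpr hdvd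
      have := Int.le_of_dvd (by omega) this
      omega
    have hfuel : (0 - max).toNat < svwrFuel min max := by
      have : svwrFuel min max = N + 1 := by rw [svwrFuel, ← hxs, ← hN]
      omega
    rw [hB]
    exact loop_reaches min max L 0 hLpos hiff (dvd_zero L) (svwrFuel min max) max hbr.2 hmin hfuel
  -- general path
  have hfold : xs.foldl (fun l i => PySem.Int.floordiv ((l * i).natAbs : Int)
      ((pvGcd l.natAbs i.natAbs : Nat) : Int)) 1 = L := by
    have := foldB_eq xs 1
    simpa using this
  set q : Int := -(PySem.Int.floordiv (-max) L) with hq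
  have hB : smallest_value_without_reminder_alt min max = q * L := by
    simp only [smallest_value_without_reminder_alt, if_neg hbr]
    rw [← hxs, hfold, hq]
  have hqb : (q - 1) * L < max ∧ max ≤ q * L :=
    (PySem.Int.neg_floordiv_neg_eq_iff_of_pos hLpos).mp hq.symm
  set T : Int := q * L with hT
  have hTd : L ∣ T := ⟨q, by rw [hT]; ring⟩
  have hmin : ∀ d, max ≤ d → d < T → ¬ L ∣ d := by
    rintro d hd1 hd2 ⟨k, hk⟩
    rw [hT] at hd2
    have hkq : k < q := by
      by_contra hge
      rw [not_lt] at hge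
      have : q * L ≤ k * L := mul_le_mul_of_nonneg_right hge (le_of_lt hLpos)
      nlinarith
    have : k * L ≤ (q - 1) * L := mul_le_mul_of_nonneg_right (by omega) (le_of_lt hLpos)
    nlinarith [hqb.1]
  have hfuel : (T - max).toNat < svwrFuel min max := by
    have : svwrFuel min max = N + 1 := by rw [svwrFuel, ← hxs, ← hN]
    rw [this]
    have hTlt : T - max < L := by
      rw [hT]
      nlinarith [hqb.1]
    omega
  have := loop_reaches min max L T hLpos hiff hTd (svwrFuel min max) max hqb.2 hmin hfuel
  rw [hB]
  unfold smallest_value_without_reminder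
  exact this
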